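-- pv_equiv track=rewrite | github.com/knutae/adventofcode | 2023/11/solve.py | expand_1d_map
-- ===== SOURCE A (Python) =====
-- def expand_1d_map(coord, expand_amount=2):
--     mapping = {}
--     add = 0
--     for c in range(max(coord) + 1):
--         if c in coord:
--             mapping[c] = c + add
--         else:
--             add += (expand_amount - 1)
--     return mapping
-- ===== SOURCE B (Python) =====
-- def expand_1d_map(coord, expand_amount=2):
--     cs = sorted(set(c for c in coord if c >= 0))
--     return {c: c + (c - i) * (expand_amount - 1) for i, c in enumerate(cs)}
-- ===== Notes on version B (the rewrite author's own statement) =====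
-- stated objective: alternative
-- what changed: Instead of scanning every integer 0..max(coord) with an 'in coord' test per step, B sorts the distinct nonnegative coordinates and computes each expanded position in closed form from its rank: c + (c - i)*(expand_amount - 1).
-- crash fix: On an empty coord list A raises ValueError (max of empty sequence) while B returns the empty dict. — e.g. on expand_1d_map([], 2): A raises ValueError, B returns []
import Mathlib
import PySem

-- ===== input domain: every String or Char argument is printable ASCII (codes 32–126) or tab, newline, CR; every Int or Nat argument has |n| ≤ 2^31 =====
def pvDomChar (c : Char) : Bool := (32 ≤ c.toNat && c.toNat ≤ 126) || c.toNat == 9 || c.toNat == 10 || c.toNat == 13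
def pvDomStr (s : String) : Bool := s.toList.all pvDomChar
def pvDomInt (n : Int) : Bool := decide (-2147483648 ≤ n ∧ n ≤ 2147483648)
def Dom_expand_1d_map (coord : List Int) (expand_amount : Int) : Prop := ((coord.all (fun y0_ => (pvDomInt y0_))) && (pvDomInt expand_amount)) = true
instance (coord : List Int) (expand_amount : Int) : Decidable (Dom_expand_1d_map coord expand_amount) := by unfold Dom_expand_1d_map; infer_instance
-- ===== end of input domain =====

-- B replaces A's scan of every integer in [0, max(coord)] by sorting the distinct
-- nonnegative coordinates and computing each expanded position in closed form from its rank.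


-- ===== PORT A =====
-- loop body of A's 'for c in range(max(coord) + 1)': state = (mapping, add)
def expandStep (coord : List Int) (expand_amount : Int)
    (st : PySem.Dict Int Int × Int) (c : Int) : PySem.Dict Int Int × Int :=
  if c ∈ coord then (st.1.insert c (c + st.2), st.2)
  else (st.1, st.2 + (expand_amount - 1))

def expand_1d_map (coord : List Int) (expand_amount : Int) : List (Int × Int) :=
  match PySem.List.max? coord (fun x => x) with
  | none => []   -- max([]) raises ValueError: excluded by Pre_expand_1d_map
  | some m =>
    ((PySem.List.pyRange 0 (m + 1) 1).foldl (expandStep coord expand_amount)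
      (PySem.Dict.empty, 0)).1.items

-- ===== PORT B =====
def expand_1d_map_alt (coord : List Int) (expand_amount : Int) : List (Int × Int) :=
  let cs := PySem.List.sorted (PySem.Set.ofList (coord.filter (fun c => decide (0 ≤ c)))) (fun x => x) false
  (PySem.List.enumerate cs 0).map (fun p => (p.2, p.2 + (p.2 - p.1) * (expand_amount - 1)))

-- ===== PRECONDITION & SPEC =====
-- Pre_ excludes only the empty list, on which A's max(coord) raises ValueError.
def Pre_expand_1d_map (coord : List Int) (_expand_amount : Int) : Prop := coord ≠ []
instance (coord : List Int) (expand_amount : Int) : Decidable (Pre_expand_1d_map coord expand_amount) := by unfold Pre_expand_1d_map; infer_instance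
def pvWitness_expand_1d_map : List Int × Int := ([3, 0, 3], 2)

-- On an empty coord list A raises ValueError (max of empty sequence) while B returns the empty dict.
def Raises_expand_1d_map (coord : List Int) (_expand_amount : Int) : Prop := coord = []
instance (coord : List Int) (expand_amount : Int) : Decidable (Raises_expand_1d_map coord expand_amount) := by unfold Raises_expand_1d_map; infer_instance
def pvRaiseWitness_expand_1d_map : List Int × Int := ([], 2)
def pvRaiseWitnessOut_expand_1d_map : List (Int × Int) := []

def Spec_expand_1d_map (coord : List Int) (expand_amount : Int) (out : List (Int × Int)) : Prop := out = expand_1d_map_alt coord expand_amount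
instance (coord : List Int) (expand_amount : Int) (out : List (Int × Int)) : Decidable (Spec_expand_1d_map coord expand_amount out) := by unfold Spec_expand_1d_map; infer_instance

-- ===== CLAIM (what is proved, stated in full; the proofs are below) =====
def Claim_equal_expand_1d_map : Prop := ∀ (coord : List Int) (expand_amount : Int), Dom_expand_1d_map coord expand_amount → Pre_expand_1d_map coord expand_amount → Spec_expand_1d_map coord expand_amount (expand_1d_map coord expand_amount)

def Claim_raises_expand_1d_map : Prop := (∀ (coord : List Int) (expand_amount : Int), Dom_expand_1d_map coord expand_amount → Raises_expand_1d_map coord expand_amount → ¬ Pre_expand_1d_map coord expand_amount) ∧ (Dom_expand_1d_map (pvRaiseWitness_expand_1d_map.1) (pvRaiseWitness_expand_1d_map.2) ∧ Raises_expand_1d_map (pvRaiseWitness_expand_1d_map.1) (pvRaiseWitness_expand_1d_map.2) ∧ expand_1d_map_alt (pvRaiseWitness_expand_1d_map.1) (pvRaiseWitness_expand_1d_map.2) = pvRaiseWitnessOut_expand_1d_map)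

-- ===== LEMMAS AND PROOFS =====

-- filtering a strictly increasing list by '< n+1' when n is a member appends exactly [n]
lemma filter_lt_succ_of_mem (S : List Int) (hpair : S.Pairwise (· < ·)) (n : Int) (hn : n ∈ S) :
    S.filter (fun c => decide (c < n + 1)) = S.filter (fun c => decide (c < n)) ++ [n] := by
  induction S with
  | nil => cases hn
  | cons x S ih =>
    rcases List.pairwise_cons.mp hpair with ⟨hx, hp⟩
    rcases List.mem_cons.mp hn with heq | hn'
    · subst heq
      have h1 : S.filter (fun c => decide (c < n + 1)) = [] :=
        List.filter_eq_nil_iff.mpr (fun c hc => by have := hx c hc; simp; omega)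
      have h2 : S.filter (fun c => decide (c < n)) = [] :=
        List.filter_eq_nil_iff.mpr (fun c hc => by have := hx c hc; simp; omega)
      rw [List.filter_cons, List.filter_cons, h1, h2]
      norm_num
    · have hxn : x < n := hx n hn'
      rw [List.filter_cons, List.filter_cons, ih hp hn']
      have hb1 : decide (x < n + 1) = true := by simp; omega
      have hb2 : decide (x < n) = true := by simp; omega
      rw [hb1, hb2]
      simp

-- filtering by '< n+1' when n is not a member changes nothing
lemma filter_lt_succ_of_not_mem (S : List Int) (n : Int) (hn : n ∉ S) :
    S.filter (fun c => decide (c < n + 1)) = S.filter (fun c => decide (c < n)) := by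
  apply List.filter_congr
  intro c hc
  have : c ≠ n := fun h => hn (h ▸ hc)
  simp; omega

-- the loop invariant: after processing range(0, n), the mapping holds exactly the
-- members of S below n (in order, with B's closed-form values) and add counts the gaps
lemma expand_loop_inv (coord : List Int) (e : Int) (S : List Int)
    (hpair : S.Pairwise (· < ·))
    (hmem : ∀ c, c ∈ S ↔ (0 ≤ c ∧ c ∈ coord)) (n : Nat) :
    ((PySem.List.pyRange 0 (n : Int) 1).foldl (expandStep coord e) (PySem.Dict.empty, 0)).1.items
      = (PySem.List.enumerate (S.filter (fun c => decide (c < (n : Int)))) 0).map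
          (fun p => (p.2, p.2 + (p.2 - p.1) * (e - 1)))
    ∧ ((PySem.List.pyRange 0 (n : Int) 1).foldl (expandStep coord e) (PySem.Dict.empty, 0)).2
      = ((n : Int) - (S.filter (fun c => decide (c < (n : Int)))).length) * (e - 1) := by
  induction n with
  | zero =>
    have hF : S.filter (fun c => decide (c < (0 : Int))) = [] :=
      List.filter_eq_nil_iff.mpr (fun c hc => by
        have := (hmem c).mp hc; simp; omega)
    simp [PySem.List.pyRange_one_eq_nil (by omega : (0:Int) ≤ 0), hF,
      PySem.List.enumerate_nil, PySem.Dict.empty]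
  | succ n ih =>
    have hrange : PySem.List.pyRange 0 ((n + 1 : Nat) : Int) 1
        = PySem.List.pyRange 0 (n : Int) 1 ++ [(n : Int)] := by
      push_cast
      exact PySem.List.pyRange_one_succ_right (by positivity)
    rw [hrange, List.foldl_append]
    simp only [List.foldl_cons, List.foldl_nil]
    set st := (PySem.List.pyRange 0 (n : Int) 1).foldl (expandStep coord e) (PySem.Dict.empty, 0) with hst
    obtain ⟨ih1, ih2⟩ := ih
    have hkeys : st.1.items.map (·.1) = S.filter (fun c => decide (c < (n : Int))) := by
      rw [ih1, List.map_map]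
      exact PySem.List.map_snd_enumerate _ _
    by_cases hc : (n : Int) ∈ coord
    · -- n is a coordinate: inserted with the current add
      have hnS : (n : Int) ∈ S := (hmem _).mpr ⟨by positivity, hc⟩
      have hF : S.filter (fun c => decide (c < ((n + 1 : Nat) : Int)))
          = S.filter (fun c => decide (c < (n : Int))) ++ [(n : Int)] := by
        push_cast
        exact filter_lt_succ_of_mem S hpair _ hnS
      have hnotin : st.1.contains (n : Int) = false := by
        rw [PySem.Dict.contains_eq_decide_mem_keys]
        simp only [PySem.Dict.keys, hkeys]
        simp
      constructor
      · rw [show expandStep coord e st (n : Int) = (st.1.insert (n : Int) ((n : Int) + st.2), st.2) from by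
          simp [expandStep, hc]]
        rw [PySem.Dict.items_insert_of_not_contains _ _ hnotin, ih1, hF,
          PySem.List.enumerate_append, List.map_append]
        simp [PySem.List.enumerate_cons, PySem.List.enumerate_nil, ih2]
      · rw [show expandStep coord e st (n : Int) = (st.1.insert (n : Int) ((n : Int) + st.2), st.2) from by
          simp [expandStep, hc]]
        simp only [hF, List.length_append, List.length_cons, List.length_nil]
        rw [ih2]; push_cast; ring
    · -- n is a gap: add grows by (e - 1)
      have hnS : (n : Int) ∉ S := fun h => hc ((hmem _).mp h).2
      have hF : S.filter (fun c => decide (c < ((n + 1 : Nat) : Int)))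
          = S.filter (fun c => decide (c < (n : Int))) := by
        push_cast
        exact filter_lt_succ_of_not_mem S _ hnS
      constructor
      · rw [show expandStep coord e st (n : Int) = (st.1, st.2 + (e - 1)) from by
          simp [expandStep, hc]]
        rw [hF]; exact ih1
      · rw [show expandStep coord e st (n : Int) = (st.1, st.2 + (e - 1)) from by
          simp [expandStep, hc]]
        simp only [hF]
        rw [ih2]; push_cast; ring

-- ===== VERDICT (by name: the statement is the Claim_ definition above) =====
theorem expand_1d_map_spec : Claim_equal_expand_1d_map := by
  intro coord e _hdom hpre
  unfold Spec_expand_1d_map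
  cases hmax : PySem.List.max? coord (fun x => x) with
  | none => exact absurd ((PySem.List.max?_eq_none_iff coord (fun x => x)).mp hmax) hpre
  | some m =>
    have hA : expand_1d_map coord e
        = ((PySem.List.pyRange 0 (m + 1) 1).foldl (expandStep coord e) (PySem.Dict.empty, 0)).1.items := by
      unfold expand_1d_map; rw [hmax]
    rw [hA]
    set S := PySem.List.sorted (PySem.Set.ofList (coord.filter (fun c => decide (0 ≤ c)))) (fun x => x) false with hS
    have hpair : S.Pairwise (· < ·) := PySem.List.sorted_ofList_pairwise_lt _
    have hmem : ∀ c, c ∈ S ↔ (0 ≤ c ∧ c ∈ coord) := by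
      intro c
      rw [hS, PySem.List.mem_sorted, PySem.Set.mem_ofList, List.mem_filter]
      simp [and_comm]
    have hle : ∀ c ∈ coord, c ≤ m := PySem.List.max?_isMax hmax
    have hBeq : expand_1d_map_alt coord e
        = (PySem.List.enumerate S 0).map (fun p => (p.2, p.2 + (p.2 - p.1) * (e - 1))) := rfl
    rw [hBeq]
    by_cases hm : 0 ≤ m
    · have hn : ((m + 1).toNat : Int) = m + 1 := Int.toNat_of_nonneg (by omega)
      have := (expand_loop_inv coord e S hpair hmem (m + 1).toNat).1
      rw [hn] at this
      have hF : S.filter (fun c => decide (c < m + 1)) = S := by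
        apply List.filter_eq_self.mpr
        intro c hc
        have := hle c ((hmem c).mp hc).2
        simp; omega
      rw [this, hF]
    · -- max(coord) < 0: the range is empty and no coordinate is nonnegative
      have hr : PySem.List.pyRange 0 (m + 1) 1 = [] :=
        PySem.List.pyRange_one_eq_nil (by omega)
      have hSnil : S = [] := by
        apply List.eq_nil_iff_forall_not_mem.mpr
        intro c hc
        obtain ⟨h0, hcc⟩ := (hmem c).mp hc
        have := hle c hcc
        omega
      rw [hr, hSnil]
      simp [PySem.List.enumerate_nil, PySem.Dict.empty]

@[simp] theorem expand_1d_map_raises : Claim_raises_expand_1d_map := by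
  unfold Claim_raises_expand_1d_map
  exact ⟨fun coord e _ h hp => hp h, by decide⟩
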